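-- pv_equiv track=rewrite | github.com/raeez/chiral-bar-cobar | compute/lib/bar_cohomology_n2sca_explicit_engine.py | _multisets
-- ===== SOURCE A (Python) =====
-- def _multisets(n_types, size):
--     """Multisets of given size from n_types objects."""
--     if n_types == 0:
--         return [()] if size == 0 else []
--     if n_types == 1:
--         return [(size,)]
--     result = []
--     for c in range(size + 1):
--         for rest in _multisets(n_types - 1, size - c):
--             result.append((c,) + rest)
--     return result
-- ===== SOURCE B (Python) =====
-- def _multisets(n_types, size):
--     """Multisets of given size from n_types objects (iterative frontier expansion)."""
--     if n_types == 0: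
--         return [()] if size == 0 else []
--     partial = [((), size)]
--     for _ in range(n_types - 1):
--         if not partial:
--             break
--         partial = [(p + (c,), r - c) for (p, r) in partial for c in range(r + 1)]
--     return [p + (r,) for (p, r) in partial]
-- ===== Notes on version B (the rewrite author's own statement) =====
-- stated objective: alternative
-- what changed: Replaces A's recursion on n_types by an iterative breadth-first expansion of a (prefix, remaining-sum) frontier list, finishing each row with its remaining sum.
-- outside the precondition, e.g. on _multisets(-1, -2): A returns [], B returns [(-2,)]
import Mathlib
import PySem

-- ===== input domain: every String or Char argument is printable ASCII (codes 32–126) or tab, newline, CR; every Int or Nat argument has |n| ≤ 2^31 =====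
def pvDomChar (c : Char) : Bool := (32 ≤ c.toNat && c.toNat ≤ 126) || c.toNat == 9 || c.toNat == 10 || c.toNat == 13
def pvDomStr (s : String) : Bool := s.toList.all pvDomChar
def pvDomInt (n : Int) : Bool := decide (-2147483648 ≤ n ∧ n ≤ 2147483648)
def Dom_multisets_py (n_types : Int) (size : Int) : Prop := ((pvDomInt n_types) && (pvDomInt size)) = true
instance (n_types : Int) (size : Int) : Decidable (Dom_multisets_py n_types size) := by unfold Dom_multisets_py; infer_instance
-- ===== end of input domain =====

-- B replaces A's recursion on n_types by an iterative breadth-first expansion of a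
-- (prefix, remaining-sum) frontier (objective: alternative, same cost).

-- ===== PORT A =====
-- literal transliteration of _multisets; the 'n_types < 0' guard only cuts the
-- recursion where the Python diverges (RecursionError), outside Pre_.
def multisets_py (n_types : Int) (size : Int) : List (List Int) :=
  if n_types = 0 then (if size = 0 then [[]] else [])
  else if n_types = 1 then [[size]]
  else if n_types < 0 then []
  else
    (PySem.List.pyRange 0 (size + 1) 1).foldl
      (fun result c =>
        result ++ (multisets_py (n_types - 1) (size - c)).map (fun rest => c :: rest)) []
termination_by n_types.toNat
decreasing_by omega

-- ===== PORT B =====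
-- the body of Source B's loop, named: one expansion of the (prefix, remaining-sum) frontier
def mstep (l : List (List Int × Int)) : List (List Int × Int) :=
  l.flatMap (fun pr => (PySem.List.pyRange 0 (pr.2 + 1) 1).map (fun c => (pr.1 ++ [c], pr.2 - c)))

-- Source B's loop: run mstep (n_types - 1) times (= len(range(n_types-1)) iterations),
-- breaking out early once the frontier is empty
def mloop : Nat → List (List Int × Int) → List (List Int × Int)
  | 0, part => part
  | k + 1, part => if part = [] then part else mloop k (mstep part)

def multisets_py_alt (n_types : Int) (size : Int) : List (List Int) :=
  if n_types = 0 then (if size = 0 then [[]] else [])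
  else (mloop (n_types - 1).toNat [([], size)]).map (fun pr => pr.1 ++ [pr.2])

-- ===== PRECONDITION & SPEC =====
-- Pre_ excludes negative n_types, on which A either overflows the recursion
-- (RecursionError, when size ≥ 0) or returns [] merely because its loop range is
-- empty (size < 0); B's frontier expansion returns [(size,)] there.
def Pre_multisets_py (n_types : Int) (size : Int) : Prop := 0 ≤ n_types
instance (n_types : Int) (size : Int) : Decidable (Pre_multisets_py n_types size) := by unfold Pre_multisets_py; infer_instance
def pvWitness_multisets_py : Int × Int := (3, 4)

def Spec_multisets_py (n_types : Int) (size : Int) (out : List (List Int)) : Prop := out = multisets_py_alt n_types size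
instance (n_types : Int) (size : Int) (out : List (List Int)) : Decidable (Spec_multisets_py n_types size out) := by unfold Spec_multisets_py; infer_instance

-- ===== CLAIM (what is proved, stated in full; the proofs are below) =====
def Claim_equal_multisets_py : Prop := ∀ (n_types : Int) (size : Int), Dom_multisets_py n_types size → Pre_multisets_py n_types size → Spec_multisets_py n_types size (multisets_py n_types size)

-- ===== LEMMAS AND PROOFS =====

theorem mstep_append (xs ys : List (List Int × Int)) :
    mstep (xs ++ ys) = mstep xs ++ mstep ys := by
  simp [mstep]

theorem mstep_iter_append (k : ℕ) :
    ∀ (xs ys : List (List Int × Int)),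
      mstep^[k] (xs ++ ys) = mstep^[k] xs ++ mstep^[k] ys := by
  induction k with
  | zero => intro xs ys; simp
  | succ k ih => intro xs ys; simp [Function.iterate_succ_apply, mstep_append, ih]

theorem mstep_iter_nil (k : ℕ) : mstep^[k] ([] : List (List Int × Int)) = [] := by
  induction k with
  | zero => simp
  | succ k ih => simp [Function.iterate_succ_apply, mstep, ih]

theorem mloop_eq_iterate :
    ∀ (k : ℕ) (part : List (List Int × Int)), mloop k part = mstep^[k] part := by
  intro k
  induction k with
  | zero => intro part; simp [mloop]
  | succ k ih =>
    intro part
    by_cases h : part = []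
    · subst h
      simp [mloop, mstep_iter_nil]
    · rw [mloop, if_neg h, ih, Function.iterate_succ_apply]

theorem mstep_iter_flatMap {β : Type} (k : ℕ) (g : β → List (List Int × Int)) :
    ∀ (l : List β), mstep^[k] (l.flatMap g) = l.flatMap (fun x => mstep^[k] (g x)) := by
  intro l
  induction l with
  | nil => simp [mstep_iter_nil]
  | cons a t ih => simp [List.flatMap_cons, mstep_iter_append, ih]

theorem mstep_iter_shift (k : ℕ) :
    ∀ (p : List Int) (r : Int),
      mstep^[k] [(p, r)] = (mstep^[k] [([], r)]).map (fun qr => (p ++ qr.1, qr.2)) := by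
  induction k with
  | zero => intro p r; simp
  | succ k ih =>
    intro p r
    rw [Function.iterate_succ_apply, Function.iterate_succ_apply]
    have h1 : mstep [(p, r)] =
        (PySem.List.pyRange 0 (r + 1) 1).flatMap (fun c => [(p ++ [c], r - c)]) := by
      simp [mstep, List.map_eq_flatMap]
    have h2 : mstep [(([] : List Int), r)] =
        (PySem.List.pyRange 0 (r + 1) 1).flatMap (fun c => [(([c] : List Int), r - c)]) := by
      simp [mstep, List.map_eq_flatMap]
    rw [h1, h2, mstep_iter_flatMap, mstep_iter_flatMap]
    simp only [List.map_flatMap]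
    refine List.flatMap_congr (fun x _ => ?_)
    rw [ih, ih [x]]
    simp [List.map_map, Function.comp, List.append_assoc]

theorem mstep_main (k : ℕ) :
    ∀ (s : Int),
      (mstep^[k] [(([] : List Int), s)]).map (fun pr => pr.1 ++ [pr.2]) =
        multisets_py ((k : Int) + 1) s := by
  induction k with
  | zero => intro s; rw [multisets_py]; simp
  | succ k ih =>
    intro s
    rw [Function.iterate_succ_apply]
    have h2 : mstep [(([] : List Int), s)] =
        (PySem.List.pyRange 0 (s + 1) 1).flatMap (fun c => [(([c] : List Int), s - c)]) := by
      simp [mstep, List.map_eq_flatMap]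
    rw [h2, mstep_iter_flatMap]
    rw [multisets_py]
    rw [if_neg (by push_cast; omega), if_neg (by push_cast; omega), if_neg (by push_cast; omega)]
    rw [PySem.List.foldl_append_eq_flatMap]
    simp only [List.map_flatMap, List.nil_append]
    refine (List.flatMap_congr (fun c _ => ?_)).symm
    have h3 : ((k + 1 : ℕ) : Int) + 1 - 1 = (k : Int) + 1 := by push_cast; omega
    rw [h3, ← ih (s - c), mstep_iter_shift k [c] (s - c)]
    simp [List.map_map, Function.comp_def]

theorem multisets_py_spec : Claim_equal_multisets_py := by
  intro n size _ hpre
  unfold Spec_multisets_py multisets_py_alt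
  by_cases h0 : n = 0
  · subst h0; rw [multisets_py]; simp
  · have hn : 1 ≤ n := by
      have : 0 ≤ n := hpre
      omega
    rw [if_neg h0, mloop_eq_iterate, mstep_main]
    congr 1
    omega
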